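-- pv_equiv track=rewrite | github.com/Nerfherder16/Recall | src/core/document_ingest.py | chunk_pdf_pages
-- ===== SOURCE A (Python) =====
-- MAX_CHUNK_CHARS = 3000
--
-- def chunk_pdf_pages(pages: list[str]) -> list[str]:
--     """Chunk PDF pages, merging small pages."""
--     chunks = []
--     current = ""
--
--     for page_text in pages:
--         page_text = page_text.strip()
--         if not page_text:
--             continue
--         if len(current) + len(page_text) + 2 > MAX_CHUNK_CHARS and current:
--             chunks.append(current.strip())
--             current = page_text
--         else:
--             current = f"{current}\n\n{page_text}" if current else page_text
--
--     if current.strip():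
--         chunks.append(current.strip())
--
--     return chunks
-- ===== SOURCE B (Python) =====
-- MAX_CHUNK_CHARS = 3000
--
-- def chunk_pdf_pages(pages: list[str]) -> list[str]:
--     """Chunk PDF pages, merging small pages.
--
--     Staged algorithm: filter the stripped non-empty pages, build a prefix-sum
--     table P (P[j] = total length of the first j pages, counting len+2 per page),
--     then cut the sequence at boundaries found by BINARY SEARCH on P: from start i
--     the chunk extends to the largest j <= n with P[j] - P[i] <= MAX_CHUNK_CHARS + 2
--     (at least one page).  Correct because each chunk of the greedy merge is exactly
--     the maximal prefix whose joined length (sum of lengths + 2 per separator) fits.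
--     """
--     texts = [t for t in (p.strip() for p in pages) if t]
--     P = [0]
--     for t in texts:
--         P.append(P[-1] + len(t) + 2)
--     n = len(texts)
--     chunks = []
--     i = 0
--     while i < n:
--         lo, hi = i + 1, n
--         while lo < hi:
--             mid = (lo + hi + 1) // 2
--             if P[mid] - P[i] <= MAX_CHUNK_CHARS + 2:
--                 lo = mid
--             else:
--                 hi = mid - 1
--         chunks.append("\n\n".join(texts[i:lo]))
--         i = lo
--     return chunks
-- ===== Notes on version B (the rewrite author's own statement) =====
-- stated objective: alternative
-- what changed: A accumulates one growing chunk string in a single greedy pass; B stages the work: filter the stripped pages, precompute a prefix-sum table of page lengths (+2 per separator), locate each chunk boundary by binary search on the prefix sums (maximal prefix that fits), and join each slice once.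
import Mathlib
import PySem

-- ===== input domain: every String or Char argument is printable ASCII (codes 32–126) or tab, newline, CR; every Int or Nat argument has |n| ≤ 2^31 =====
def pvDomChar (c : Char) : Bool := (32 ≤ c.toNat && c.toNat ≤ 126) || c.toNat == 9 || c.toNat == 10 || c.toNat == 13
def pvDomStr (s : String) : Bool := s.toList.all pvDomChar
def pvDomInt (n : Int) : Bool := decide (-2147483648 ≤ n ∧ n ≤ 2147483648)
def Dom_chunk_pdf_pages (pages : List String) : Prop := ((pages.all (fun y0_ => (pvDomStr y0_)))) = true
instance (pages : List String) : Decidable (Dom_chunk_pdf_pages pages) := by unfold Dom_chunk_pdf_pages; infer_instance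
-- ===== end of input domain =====

-- B replaces A's single greedy string-accumulating pass by staged passes: filter the stripped
-- pages, build a prefix-sum table of page lengths (+2 per separator), find each chunk boundary
-- by binary search on the prefix sums, and join each slice once; objective: alternative.

-- ===== PORT A =====
-- one iteration of A's for-loop; state = (chunks, current), strings as List Char
def pvStepA (st : List (List Char) × List Char) (page : String) : List (List Char) × List Char :=
  let pt := PySem.Chars.strip page.toList
  if pt = [] then st
  else if PySem.Chars.len st.2 + PySem.Chars.len pt + 2 > 3000 ∧ st.2 ≠ [] then
    (st.1 ++ [PySem.Chars.strip st.2], pt)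
  else
    (st.1, if st.2 ≠ [] then st.2 ++ '\n' :: '\n' :: pt else pt)

def chunk_pdf_pages (pages : List String) : List String :=
  let st := pages.foldl pvStepA ([], [])
  let chunks := if PySem.Chars.strip st.2 ≠ [] then st.1 ++ [PySem.Chars.strip st.2] else st.1
  chunks.map String.ofList

-- ===== PORT B =====
-- one iteration of B's prefix-sum loop: P.append(P[-1] + len(t) + 2)
-- (P is never empty, so the Python P[-1] always succeeds; .getD 0 is unreachable)
def pvStepP (P : List Int) (t : List Char) : List Int :=
  P ++ [(PySem.List.pyGet? P (-1)).getD 0 + PySem.Chars.len t + 2]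

-- B's inner while-loop: binary search for the largest j in [lo,hi] with P[j] - base <= 3002
-- ((lo+hi+1)//2 on nonnegative ints coincides with Nat division); the interval shrinks every
-- iteration, so fuel = hi - lo steps always suffice (fuel is only a structural totality guard)
def pvBsearch (P : List Int) (base : Int) : Nat → Nat → Nat → Nat
  | 0, lo, _ => lo
  | fuel + 1, lo, hi =>
    if lo < hi then
      if (PySem.List.pyGet? P (((lo + hi + 1) / 2 : Nat) : Int)).getD 0 - base ≤ 3002 then
        pvBsearch P base fuel ((lo + hi + 1) / 2) hi
      else
        pvBsearch P base fuel lo ((lo + hi + 1) / 2 - 1)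
    else lo

-- B's outer while-loop over the chunk start index i; i advances every iteration, so
-- fuel = n - i steps always suffice (fuel is only a structural totality guard)
def pvOuterB (texts : List (List Char)) (P : List Int) (n : Nat) :
    Nat → Nat → List (List Char) → List (List Char)
  | 0, _, chunks => chunks
  | fuel + 1, i, chunks =>
    if i < n then
      pvOuterB texts P n fuel
        (pvBsearch P ((PySem.List.pyGet? P (i : Int)).getD 0) (n - (i + 1)) (i + 1) n)
        (chunks ++ [PySem.Chars.join ['\n', '\n']
          (PySem.List.slice texts (some (i : Int))
            (some ((pvBsearch P ((PySem.List.pyGet? P (i : Int)).getD 0)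
              (n - (i + 1)) (i + 1) n : Nat) : Int)))])
    else chunks

def chunk_pdf_pages_alt (pages : List String) : List String :=
  let texts := (pages.map (fun p => PySem.Chars.strip p.toList)).filter (fun t => !t.isEmpty)
  let P := texts.foldl pvStepP [0]
  (pvOuterB texts P texts.length texts.length 0 []).map String.ofList

-- ===== PRECONDITION & SPEC =====
def Spec_chunk_pdf_pages (pages : List String) (out : List String) : Prop := out = chunk_pdf_pages_alt pages
instance (pages : List String) (out : List String) : Decidable (Spec_chunk_pdf_pages pages out) := by unfold Spec_chunk_pdf_pages; infer_instance

-- ===== CLAIM (what is proved, stated in full; the proofs are below) =====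
def Claim_equal_chunk_pdf_pages : Prop := ∀ (pages : List String), Dom_chunk_pdf_pages pages → Spec_chunk_pdf_pages pages (chunk_pdf_pages pages)

-- ===== LEMMAS AND PROOFS =====

-- join with the "\n\n" separator
def pvJ (g : List (List Char)) : List Char := PySem.Chars.join ['\n', '\n'] g

-- the stripped non-empty pages
def pvTexts (pages : List String) : List (List Char) :=
  (pages.map (fun p => PySem.Chars.strip p.toList)).filter (fun t => !t.isEmpty)

-- intermediate greedy partition into groups (page lists), state = (groups, cur, joined len)
def pvStepB (st : List (List (List Char)) × List (List Char) × Int) (t : List Char) :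
    List (List (List Char)) × List (List Char) × Int :=
  if st.2.1 ≠ [] ∧ st.2.2 + PySem.Chars.len t + 2 > 3000 then
    (st.1 ++ [st.2.1], [t], PySem.Chars.len t)
  else
    (st.1, st.2.1 ++ [t],
      if st.2.1 ≠ [] then st.2.2 + PySem.Chars.len t + 2 else PySem.Chars.len t)

def pvGroupsOf (ts : List (List Char)) : List (List (List Char)) :=
  let st := ts.foldl pvStepB ([], [], 0)
  if st.2.1 ≠ [] then st.1 ++ [st.2.1] else st.1

-- a "good" piece: nonempty and already stripped
def pvGood (t : List Char) : Prop := t ≠ [] ∧ PySem.Chars.strip t = t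

-- both ends (if any) are non-whitespace
def pvEndsOk (l : List Char) : Prop :=
  (∀ c ∈ l.head?, PySem.Chars.isspace c = false) ∧
  (∀ c ∈ l.getLast?, PySem.Chars.isspace c = false)

-- the coupling invariant between A's loop state and the group-partition state
def pvRel (a : List (List Char) × List Char)
    (b : List (List (List Char)) × List (List Char) × Int) : Prop :=
  a.1 = b.1.map pvJ ∧ a.2 = pvJ b.2.1 ∧ b.2.2 = ((pvJ b.2.1).length : Int) ∧
    ∀ t ∈ b.2.1, pvGood t

lemma pvJ_nil : pvJ [] = [] := rfl

lemma pvJ_singleton (t : List Char) : pvJ [t] = t := by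
  simp [pvJ, PySem.Chars.join, List.intercalate]

lemma pvJ_cons (a : List Char) (r : List (List Char)) (h : r ≠ []) :
    pvJ (a :: r) = a ++ '\n' :: '\n' :: pvJ r := by
  obtain ⟨b, l, rfl⟩ := List.exists_cons_of_ne_nil h
  simp [pvJ, PySem.Chars.join, List.intercalate, List.intersperse]

lemma pvJ_append_singleton (g : List (List Char)) (t : List Char) (h : g ≠ []) :
    pvJ (g ++ [t]) = pvJ g ++ '\n' :: '\n' :: t := by
  induction g with
  | nil => simp at h
  | cons a r ih =>
    cases r with
    | nil => simp [pvJ_singleton, pvJ_cons]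
    | cons b l =>
      rw [List.cons_append, pvJ_cons _ _ (by simp), pvJ_cons _ _ (by simp), ih (by simp)]
      simp

lemma pvLstrip_eq_self {l : List Char}
    (h : ∀ c ∈ l.head?, PySem.Chars.isspace c = false) :
    PySem.Chars.lstrip l = l := by
  cases l with
  | nil => rfl
  | cons c r => simp [PySem.Chars.lstrip, h c (by simp)]

lemma pvRstrip_eq_self {l : List Char}
    (h : ∀ c ∈ l.getLast?, PySem.Chars.isspace c = false) :
    PySem.Chars.rstrip l = l := by
  cases hrev : l.reverse with
  | nil => simp [PySem.Chars.rstrip, List.reverse_eq_nil_iff.mp hrev]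
  | cons d t =>
    have hd : l.getLast? = some d := by rw [← List.head?_reverse, hrev]; rfl
    have hw : PySem.Chars.isspace d = false := h d (by simp [hd])
    have : List.dropWhile PySem.Chars.isspace l.reverse = l.reverse := by
      rw [hrev, List.dropWhile_cons, if_neg (by simp [hw])]
    simp [PySem.Chars.rstrip, this]

lemma pvStrip_eq_self {l : List Char} (h : pvEndsOk l) : PySem.Chars.strip l = l := by
  rw [PySem.Chars.strip, pvLstrip_eq_self h.1, pvRstrip_eq_self h.2]

lemma pvDW_head {p : Char → Bool} {l : List Char} {c : Char} {r : List Char}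
    (h : List.dropWhile p l = c :: r) : p c = false := by
  have hne : List.dropWhile p l ≠ [] := by simp [h]
  have h1 := List.head_dropWhile_not p hne
  have h2 : (List.dropWhile p l).head? = some c := by rw [h]; rfl
  rw [List.head?_eq_some_head hne] at h2
  rwa [Option.some.inj h2] at h1

lemma pvEndsOk_strip (s : List Char) : pvEndsOk (PySem.Chars.strip s) := by
  constructor
  · -- head: strip s is a prefix of lstrip s = dropWhile isspace s
    intro c hc
    obtain ⟨r, hst⟩ : ∃ r, PySem.Chars.strip s = c :: r := by
      cases h' : PySem.Chars.strip s with
      | nil => simp [h'] at hc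
      | cons a b =>
        rw [h'] at hc; simp at hc
        exact ⟨b, by rw [hc]⟩
    have hpre : PySem.Chars.strip s <+: PySem.Chars.lstrip s := by
      rw [PySem.Chars.strip, PySem.Chars.rstrip]
      obtain ⟨t, ht⟩ := List.dropWhile_suffix (l := (PySem.Chars.lstrip s).reverse)
        (p := PySem.Chars.isspace)
      exact ⟨t.reverse, by rw [← List.reverse_append, ht]; simp⟩
    obtain ⟨t, ht⟩ := hpre
    have hdw : List.dropWhile PySem.Chars.isspace s = c :: (r ++ t) := by
      have : PySem.Chars.lstrip s = c :: (r ++ t) := by rw [← ht, hst]; simp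
      simpa [PySem.Chars.lstrip] using this
    exact pvDW_head hdw
  · -- last: (strip s).reverse is itself a dropWhile result
    intro c hc
    rw [← List.head?_reverse] at hc
    obtain ⟨r, hst⟩ : ∃ r, (PySem.Chars.strip s).reverse = c :: r := by
      cases h' : (PySem.Chars.strip s).reverse with
      | nil => simp [h'] at hc
      | cons a b =>
        rw [h'] at hc; simp at hc
        exact ⟨b, by rw [hc]⟩
    have hdw : List.dropWhile PySem.Chars.isspace (PySem.Chars.lstrip s).reverse = c :: r := by
      rw [← hst]; simp [PySem.Chars.strip, PySem.Chars.rstrip]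
    exact pvDW_head hdw

lemma pvGood_strip {s : List Char} (h : PySem.Chars.strip s ≠ []) :
    pvGood (PySem.Chars.strip s) :=
  ⟨h, pvStrip_eq_self (pvEndsOk_strip s)⟩

lemma pvEndsOk_of_good {t : List Char} (h : pvGood t) : pvEndsOk t := by
  rw [← h.2]; exact pvEndsOk_strip t

lemma pvGood_glue {a b : List Char} (ha : pvGood a) (hb : pvGood b) :
    pvGood (a ++ '\n' :: '\n' :: b) := by
  refine ⟨by simp [ha.1], pvStrip_eq_self ⟨?_, ?_⟩⟩
  · intro c hc
    obtain ⟨c', l, rfl⟩ := List.exists_cons_of_ne_nil ha.1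
    simp at hc; subst hc
    exact (pvEndsOk_of_good ha).1 c' (by simp)
  · intro c hc
    rw [List.getLast?_append_of_ne_nil _ (by simp : '\n' :: '\n' :: b ≠ [])] at hc
    rw [show ('\n' :: '\n' :: b) = ['\n', '\n'] ++ b by simp,
      List.getLast?_append_of_ne_nil _ hb.1] at hc
    exact (pvEndsOk_of_good hb).2 c hc

lemma pvGood_J {g : List (List Char)} (h : ∀ t ∈ g, pvGood t) (hne : g ≠ []) :
    pvGood (pvJ g) := by
  induction g with
  | nil => simp at hne
  | cons a r ih =>
    cases r with
    | nil => simpa [pvJ_singleton] using h a (by simp)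
    | cons b l =>
      rw [pvJ_cons _ _ (by simp)]
      exact pvGood_glue (h a (by simp)) (ih (fun t ht => h t (by simp [ht])) (by simp))

lemma pvStep_rel {stA : List (List Char) × List Char}
    {stB : List (List (List Char)) × List (List Char) × Int} {p : String}
    (h : pvRel stA stB) (hpt : PySem.Chars.strip p.toList ≠ []) :
    pvRel (pvStepA stA p) (pvStepB stB (PySem.Chars.strip p.toList)) := by
  obtain ⟨chunks, current⟩ := stA
  obtain ⟨groups, cur, n⟩ := stB
  obtain ⟨h1, h2, h3, h4⟩ := h
  simp only at h1 h2 h3 h4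
  subst h1 h2 h3
  have hgoodpt : pvGood (PySem.Chars.strip p.toList) := pvGood_strip hpt
  by_cases hcur : cur = []
  · -- current chunk empty: both sides just start the chunk with pt
    subst hcur
    unfold pvRel pvStepA pvStepB
    dsimp only
    rw [pvJ_nil, if_neg hpt]
    simp [pvJ_singleton, PySem.Chars.len, hgoodpt]
  · have hjne : pvJ cur ≠ [] := (pvGood_J h4 hcur).1
    unfold pvRel pvStepA pvStepB
    dsimp only
    rw [if_neg hpt]
    by_cases hbig : PySem.Chars.len (pvJ cur) + PySem.Chars.len (PySem.Chars.strip p.toList) + 2 > 3000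
    · -- split: close the current chunk, start a new one with pt
      have hbA : PySem.Chars.len (pvJ cur) + PySem.Chars.len (PySem.Chars.strip p.toList) + 2 > 3000 ∧ pvJ cur ≠ [] := ⟨hbig, hjne⟩
      have hbB : cur ≠ [] ∧ ((pvJ cur).length : Int) + PySem.Chars.len (PySem.Chars.strip p.toList) + 2 > 3000 := ⟨hcur, hbig⟩
      rw [if_pos hbA, if_pos hbB]
      refine ⟨?_, (pvJ_singleton _).symm, by simp [pvJ_singleton, PySem.Chars.len], ?_⟩
      · simp [(pvGood_J h4 hcur).2]
      · intro t ht; simp at ht; subst ht; exact hgoodpt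
    · -- merge pt into the current chunk
      have hnA : ¬(PySem.Chars.len (pvJ cur) + PySem.Chars.len (PySem.Chars.strip p.toList) + 2 > 3000 ∧ pvJ cur ≠ []) :=
        fun hco => hbig hco.1
      have hnB : ¬(cur ≠ [] ∧ ((pvJ cur).length : Int) + PySem.Chars.len (PySem.Chars.strip p.toList) + 2 > 3000) :=
        fun hco => hbig hco.2
      rw [if_neg hnA, if_pos hjne, if_neg hnB, if_pos hcur]
      refine ⟨rfl, (pvJ_append_singleton _ _ hcur).symm, ?_, ?_⟩
      · rw [pvJ_append_singleton _ _ hcur]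
        simp only [PySem.Chars.len, List.length_append, List.length_cons]
        push_cast
        ring
      · intro t ht
        rcases List.mem_append.mp ht with hm | hm
        · exact h4 t hm
        · simp at hm; subst hm; exact hgoodpt

lemma pvLoop (pages : List String) (stA : List (List Char) × List Char)
    (stB : List (List (List Char)) × List (List Char) × Int) (h : pvRel stA stB) :
    pvRel (pages.foldl pvStepA stA)
      (((pages.map (fun p => PySem.Chars.strip p.toList)).filter
          (fun t => !t.isEmpty)).foldl pvStepB stB) := by
  induction pages generalizing stA stB with
  | nil => simpa using h
  | cons p rest ih =>
    simp only [List.map_cons, List.filter_cons, List.foldl_cons]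
    by_cases hpt : PySem.Chars.strip p.toList = []
    · have hA : pvStepA stA p = stA := by unfold pvStepA; rw [if_pos hpt]
      rw [hA, hpt]
      simpa using ih stA stB h
    · rw [if_pos (by simpa using hpt)]
      simp only [List.foldl_cons]
      exact ih _ _ (pvStep_rel h hpt)

-- stage 1: A computes the joined greedy groups
lemma pvStageA (pages : List String) :
    chunk_pdf_pages pages = (pvGroupsOf (pvTexts pages)).map (fun g => String.ofList (pvJ g)) := by
  have h := pvLoop pages ([], []) ([], [], 0) ⟨rfl, rfl, rfl, by simp⟩
  simp only [chunk_pdf_pages, pvGroupsOf, pvTexts]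
  set sA := pages.foldl pvStepA ([], []) with hsA
  set sB := ((pages.map (fun p => PySem.Chars.strip p.toList)).filter
      (fun t => !t.isEmpty)).foldl pvStepB ([], [], 0) with hsB
  obtain ⟨h1, h2, h3, h4⟩ := h
  by_cases hcur : sB.2.1 = []
  · have hj : sA.2 = [] := by rw [h2, hcur, pvJ_nil]
    have hstrip : PySem.Chars.strip sA.2 = [] := by rw [hj]; rfl
    rw [if_neg (by simp [hstrip]), if_neg (by simp [hcur])]
    simp [h1, List.map_map, Function.comp]
  · have hgood := pvGood_J h4 hcur
    have hstrip : PySem.Chars.strip sA.2 = sA.2 := by rw [h2]; exact hgood.2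
    have hne : PySem.Chars.strip sA.2 ≠ [] := by rw [hstrip, h2]; exact hgood.1
    rw [if_pos hne, if_pos hcur]
    rw [hstrip, h2, h1]
    simp [List.map_map, Function.comp]

-- ===== stage 2: the group partition is the maximal-prefix greedy (recursive characterization) =====

-- joined length contributed by a list of pages (len + 2 each)
def pvS (l : List (List Char)) : Int := (l.map (fun t => PySem.Chars.len t + 2)).sum

-- how many further pages the greedy merge absorbs, starting from joined length len0
def pvTakeCnt (len0 : Int) : List (List Char) → Nat
  | [] => 0
  | t :: r => if len0 + PySem.Chars.len t + 2 > 3000 then 0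
              else 1 + pvTakeCnt (len0 + PySem.Chars.len t + 2) r

-- the greedy partition, as maximal-prefix recursion
def pvGreedy : List (List Char) → List (List (List Char))
  | [] => []
  | t :: r =>
    (t :: r.take (pvTakeCnt (PySem.Chars.len t) r))
      :: pvGreedy (r.drop (pvTakeCnt (PySem.Chars.len t) r))
termination_by ts => ts.length
decreasing_by simp

lemma pvTakeCnt_nil (len0 : Int) : pvTakeCnt len0 [] = 0 := rfl

lemma pvTakeCnt_cons (len0 : Int) (t : List Char) (r : List (List Char)) :
    pvTakeCnt len0 (t :: r) = if len0 + PySem.Chars.len t + 2 > 3000 then 0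
      else 1 + pvTakeCnt (len0 + PySem.Chars.len t + 2) r := rfl

lemma pvGreedy_nil : pvGreedy [] = [] := by rw [pvGreedy]

lemma pvGreedy_cons (t : List Char) (r : List (List Char)) :
    pvGreedy (t :: r) = (t :: r.take (pvTakeCnt (PySem.Chars.len t) r))
      :: pvGreedy (r.drop (pvTakeCnt (PySem.Chars.len t) r)) := by rw [pvGreedy]

lemma pvFold_split (ts : List (List Char)) :
    ∀ (gs : List (List (List Char))) (cur : List (List Char)) (len : Int),
      cur ≠ [] → len = ((pvJ cur).length : Int) →
      (let st := ts.foldl pvStepB (gs, cur, len)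
       if st.2.1 ≠ [] then st.1 ++ [st.2.1] else st.1)
        = gs ++ ((cur ++ ts.take (pvTakeCnt len ts)) :: pvGreedy (ts.drop (pvTakeCnt len ts))) := by
  induction ts with
  | nil =>
    intro gs cur len hc _
    simp [pvTakeCnt_nil, pvGreedy_nil, hc]
  | cons t r ih =>
    intro gs cur len hc hl
    simp only [List.foldl_cons]
    by_cases hbig : len + PySem.Chars.len t + 2 > 3000
    · have hstep : pvStepB (gs, cur, len) t = (gs ++ [cur], [t], PySem.Chars.len t) := by
        unfold pvStepB; rw [if_pos ⟨hc, hbig⟩]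
      rw [hstep]
      have := ih (gs ++ [cur]) [t] (PySem.Chars.len t) (by simp)
        (by simp [pvJ_singleton, PySem.Chars.len])
      rw [this]
      have hk : pvTakeCnt len (t :: r) = 0 := by rw [pvTakeCnt_cons, if_pos hbig]
      simp only [hk, List.take_zero, List.drop_zero, List.append_nil]
      rw [pvGreedy_cons]
      simp
    · have hstep : pvStepB (gs, cur, len) t = (gs, cur ++ [t], len + PySem.Chars.len t + 2) := by
        unfold pvStepB
        rw [if_neg (by rintro ⟨-, hco⟩; exact hbig hco), if_pos hc]
      rw [hstep]
      have hlen' : len + PySem.Chars.len t + 2 = (((pvJ (cur ++ [t])).length : Nat) : Int) := by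
        rw [pvJ_append_singleton _ _ hc, hl]
        simp only [PySem.Chars.len, List.length_append, List.length_cons]
        push_cast; ring
      have := ih gs (cur ++ [t]) (len + PySem.Chars.len t + 2) (by simp) hlen'
      rw [this]
      have hk : pvTakeCnt len (t :: r)
          = 1 + pvTakeCnt (len + PySem.Chars.len t + 2) r := by
        rw [pvTakeCnt_cons, if_neg hbig]
      rw [hk]
      have h1 : (t :: r).take (1 + pvTakeCnt (len + PySem.Chars.len t + 2) r)
          = t :: r.take (pvTakeCnt (len + PySem.Chars.len t + 2) r) := by
        rw [Nat.add_comm]; rfl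
      have h2 : (t :: r).drop (1 + pvTakeCnt (len + PySem.Chars.len t + 2) r)
          = r.drop (pvTakeCnt (len + PySem.Chars.len t + 2) r) := by
        rw [Nat.add_comm]; rfl
      rw [h1, h2]
      simp

lemma pvGroups_eq_greedy (ts : List (List Char)) : pvGroupsOf ts = pvGreedy ts := by
  cases ts with
  | nil => simp [pvGroupsOf, pvGreedy_nil]
  | cons t r =>
    unfold pvGroupsOf
    simp only [List.foldl_cons]
    have hstep : pvStepB ([], [], 0) t = ([], [t], PySem.Chars.len t) := by
      unfold pvStepB; simp
    rw [hstep]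
    have := pvFold_split r [] [t] (PySem.Chars.len t) (by simp)
      (by simp [pvJ_singleton, PySem.Chars.len])
    rw [this, pvGreedy_cons]
    simp

-- ===== stage 3: the prefix-sum table and the binary search find the same boundaries =====

-- running sums produced by the prefix loop
def pvScan (x : Int) : List (List Char) → List Int
  | [] => []
  | t :: r => (x + PySem.Chars.len t + 2) :: pvScan (x + PySem.Chars.len t + 2) r

lemma pvFoldP_eq (ts : List (List Char)) :
    ∀ (acc : List Int) (x : Int), acc.getLast? = some x →
      ts.foldl pvStepP acc = acc ++ pvScan x ts := by
  induction ts with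
  | nil => intro acc x _; simp [pvScan]
  | cons t r ih =>
    intro acc x hx
    have hstep : pvStepP acc t = acc ++ [x + PySem.Chars.len t + 2] := by
      unfold pvStepP
      rw [PySem.List.pyGet?_neg_one, hx]
      rfl
    simp only [List.foldl_cons, hstep]
    rw [ih (acc ++ [x + PySem.Chars.len t + 2]) (x + PySem.Chars.len t + 2)
      (by simp)]
    simp [pvScan]

lemma pvScan_get (ts : List (List Char)) :
    ∀ (x : Int) (j : Nat), j < ts.length →
      (pvScan x ts)[j]? = some (x + pvS (ts.take (j + 1))) := by
  induction ts with
  | nil => intro x j h; simp at h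
  | cons t r ih =>
    intro x j h
    cases j with
    | zero => simp [pvScan, pvS]; ring
    | succ m =>
      simp only [pvScan, List.getElem?_cons_succ]
      rw [ih (x + PySem.Chars.len t + 2) m (by simpa using h)]
      simp [pvS]
      ring

-- the port's read of P[j] for j ≤ n
lemma pvP_get (ts : List (List Char)) (j : Nat) (hj : j ≤ ts.length) :
    (PySem.List.pyGet? (ts.foldl pvStepP [0]) (j : Int)).getD 0 = pvS (ts.take j) := by
  rw [pvFoldP_eq ts [0] 0 rfl]
  rw [PySem.List.pyGet?_natCast]
  cases j with
  | zero => simp [pvS]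
  | succ m =>
    have : ((0 : Int) :: pvScan 0 ts)[m + 1]? = (pvScan 0 ts)[m]? := by simp
    rw [List.singleton_append, this, pvScan_get ts 0 m (by omega)]
    simp

lemma pvS_append (a b : List (List Char)) : pvS (a ++ b) = pvS a + pvS b := by
  simp [pvS]

lemma pvS_nonneg (l : List (List Char)) : 0 ≤ pvS l := by
  apply List.sum_nonneg
  intro x hx
  simp only [List.mem_map] at hx
  obtain ⟨t, -, rfl⟩ := hx
  simp [PySem.Chars.len]
  omega

lemma pvS_take_mono (ts : List (List Char)) {j j' : Nat} (h : j ≤ j') :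
    pvS (ts.take j) ≤ pvS (ts.take j') := by
  have : ts.take j' = ts.take j ++ (ts.drop j).take (j' - j) := by
    rw [← List.take_add]
    congr 1
    omega
  rw [this, pvS_append]
  have := pvS_nonneg ((ts.drop j).take (j' - j))
  omega

-- binary-search correctness against the abstract predicate q j - base ≤ 3002
lemma pvBsearch_correct (P : List Int) (q : Nat → Int) (n : Nat) (base : Int)
    (hq : ∀ j, j ≤ n → (PySem.List.pyGet? P (j : Int)).getD 0 = q j)
    (hmono : ∀ j j', j ≤ j' → j' ≤ n → q j ≤ q j') :
    ∀ (fuel lo hi : Nat), hi - lo ≤ fuel → lo ≤ hi → hi ≤ n →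
      let r := pvBsearch P base fuel lo hi
      lo ≤ r ∧ r ≤ hi ∧ (lo < r → q r - base ≤ 3002) ∧
        (∀ j, r < j → j ≤ hi → ¬(q j - base ≤ 3002)) := by
  intro fuel
  induction fuel with
  | zero =>
    intro lo hi hd hlh _
    rw [pvBsearch]
    exact ⟨le_refl _, hlh, by omega, by intro j h1 h2; omega⟩
  | succ d ih =>
    intro lo hi hd hlh hhn
    by_cases hlt : lo < hi
    · rw [pvBsearch]
      rw [if_pos hlt]
      have hmid1 : lo < (lo + hi + 1) / 2 := by omega
      have hmid2 : (lo + hi + 1) / 2 ≤ hi := by omega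
      by_cases hc : (PySem.List.pyGet? P (((lo + hi + 1) / 2 : Nat) : Int)).getD 0 - base ≤ 3002
      · simp only [if_pos hc]
        have hrec := ih ((lo + hi + 1) / 2) hi (by omega) (by omega) hhn
        obtain ⟨r1, r2, r3, r4⟩ := hrec
        refine ⟨by omega, r2, ?_, r4⟩
        intro _
        rcases Nat.lt_or_ge ((lo + hi + 1) / 2) (pvBsearch P base d ((lo + hi + 1) / 2) hi) with h' | h'
        · exact r3 h'
        · have : pvBsearch P base d ((lo + hi + 1) / 2) hi = (lo + hi + 1) / 2 := by omega
          rw [this]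
          rw [hq _ (by omega)] at hc
          exact hc
      · simp only [if_neg hc]
        have hrec := ih lo ((lo + hi + 1) / 2 - 1) (by omega) (by omega) (by omega)
        obtain ⟨r1, r2, r3, r4⟩ := hrec
        refine ⟨r1, by omega, r3, ?_⟩
        intro j hrj hjhi hpj
        by_cases hjm : j ≤ (lo + hi + 1) / 2 - 1
        · exact r4 j hrj hjm hpj
        · have hmj : (lo + hi + 1) / 2 ≤ j := by omega
          have := hmono ((lo + hi + 1) / 2) j hmj (by omega)
          rw [hq _ (by omega)] at hc
          omega
    · rw [pvBsearch]
      rw [if_neg hlt]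
      exact ⟨le_refl _, by omega, by omega, by intro j h1 h2; omega⟩

-- properties of pvTakeCnt
lemma pvS_nil : pvS [] = 0 := rfl

lemma pvS_cons (t : List Char) (l : List (List Char)) :
    pvS (t :: l) = PySem.Chars.len t + 2 + pvS l := by
  simp only [pvS, List.map_cons, List.sum_cons]

lemma pvTakeCnt_le (rs : List (List Char)) : ∀ len0, pvTakeCnt len0 rs ≤ rs.length := by
  induction rs with
  | nil => intro _; simp [pvTakeCnt_nil]
  | cons t r ih =>
    intro len0
    rw [pvTakeCnt_cons]
    by_cases hbig : len0 + PySem.Chars.len t + 2 > 3000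
    · rw [if_pos hbig]; simp
    · rw [if_neg hbig]
      have := ih (len0 + PySem.Chars.len t + 2)
      simp only [List.length_cons]
      omega

lemma pvTakeCnt_fits (rs : List (List Char)) :
    ∀ len0, 0 < pvTakeCnt len0 rs →
      len0 + pvS (rs.take (pvTakeCnt len0 rs)) ≤ 3000 := by
  induction rs with
  | nil => intro len0 h; rw [pvTakeCnt_nil] at h; omega
  | cons t r ih =>
    intro len0 h
    by_cases hbig : len0 + PySem.Chars.len t + 2 > 3000
    · rw [pvTakeCnt_cons, if_pos hbig] at h; omega
    · rw [pvTakeCnt_cons, if_neg hbig] at h ⊢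
      rw [Nat.add_comm 1 _, List.take_succ_cons, pvS_cons]
      by_cases hk : 0 < pvTakeCnt (len0 + PySem.Chars.len t + 2) r
      · have := ih (len0 + PySem.Chars.len t + 2) hk
        omega
      · have hz : pvTakeCnt (len0 + PySem.Chars.len t + 2) r = 0 := by omega
        rw [hz, List.take_zero, pvS_nil]
        omega

lemma pvTakeCnt_max (rs : List (List Char)) :
    ∀ len0, pvTakeCnt len0 rs < rs.length →
      3000 < len0 + pvS (rs.take (pvTakeCnt len0 rs + 1)) := by
  induction rs with
  | nil => intro len0 h; simp at h
  | cons t r ih =>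
    intro len0 h
    by_cases hbig : len0 + PySem.Chars.len t + 2 > 3000
    · rw [pvTakeCnt_cons, if_pos hbig]
      simp only [Nat.zero_add, List.take_succ_cons, List.take_zero, pvS_cons, pvS_nil]
      omega
    · rw [pvTakeCnt_cons, if_neg hbig] at h ⊢
      have hlt : pvTakeCnt (len0 + PySem.Chars.len t + 2) r < r.length := by
        simp only [List.length_cons] at h; omega
      have := ih (len0 + PySem.Chars.len t + 2) hlt
      rw [show 1 + pvTakeCnt (len0 + PySem.Chars.len t + 2) r + 1
          = (pvTakeCnt (len0 + PySem.Chars.len t + 2) r + 1) + 1 by omega,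
        List.take_succ_cons, pvS_cons]
      omega

-- the outer loop produces the joined greedy groups from position i on
lemma pvOuter_eq (ts : List (List Char)) :
    ∀ (fuel i : Nat) (chunks : List (List Char)), ts.length - i ≤ fuel →
      pvOuterB ts (ts.foldl pvStepP [0]) ts.length fuel i chunks
        = chunks ++ (pvGreedy (ts.drop i)).map pvJ := by
  intro fuel
  induction fuel with
  | zero =>
    intro i chunks hd
    have hni : ts.length ≤ i := by omega
    rw [pvOuterB]
    rw [List.drop_eq_nil_of_le hni]
    simp [pvGreedy_nil]
  | succ d ih =>
    intro i chunks hd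
    by_cases hlt : i < ts.length
    · rw [pvOuterB, if_pos hlt]
      -- characterize the binary-search boundary
      have hdrop : ts.drop i = ts[i] :: ts.drop (i + 1) := List.drop_eq_getElem_cons hlt
      set t := ts[i] with ht
      set r := ts.drop (i + 1) with hr
      set k := pvTakeCnt (PySem.Chars.len t) r with hk
      have hrlen : r.length = ts.length - (i + 1) := by rw [hr]; simp
      have hkle : k ≤ r.length := by rw [hk]; exact pvTakeCnt_le r _
      have hbase : (PySem.List.pyGet? (ts.foldl pvStepP [0]) (i : Int)).getD 0
          = pvS (ts.take i) := pvP_get ts i (by omega)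
      have htake : ∀ m : Nat, m ≤ r.length →
          pvS (ts.take (i + 1 + m)) - pvS (ts.take i)
            = PySem.Chars.len t + 2 + pvS (r.take m) := by
        intro m hm
        have hsplit : ts.take (i + 1 + m) = ts.take i ++ (t :: r.take m) := by
          rw [show i + 1 + m = i + (1 + m) by omega, List.take_add, hdrop,
            show (1 + m) = m + 1 by omega, List.take_succ_cons]
        rw [hsplit, pvS_append, pvS_cons]
        ring
      have hcor := pvBsearch_correct (ts.foldl pvStepP [0]) (fun j => pvS (ts.take j))
        ts.length (pvS (ts.take i))
        (fun j hj => pvP_get ts j hj)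
        (fun j j' hjj _ => pvS_take_mono ts hjj)
        (ts.length - (i + 1)) (i + 1) ts.length (by omega) (by omega) (le_refl _)
      rw [hbase]
      set lo := pvBsearch (ts.foldl pvStepP [0]) (pvS (ts.take i))
        (ts.length - (i + 1)) (i + 1) ts.length with hlo
      obtain ⟨c1, c2, c3, c4⟩ := hcor
      -- lo = i + 1 + k
      have hlok : lo = i + 1 + k := by
        rcases Nat.lt_trichotomy lo (i + 1 + k) with h' | h' | h'
        · -- lo < i+1+k : the group of size k still fits, contradicting maximality of lo
          exfalso
          have hkpos : 0 < k := by omega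
          have hfits := pvTakeCnt_fits r (PySem.Chars.len t) (hk ▸ hkpos)
          rw [← hk] at hfits
          have hpred : pvS (ts.take (i + 1 + k)) - pvS (ts.take i) ≤ 3002 := by
            rw [htake k hkle]; omega
          exact c4 (i + 1 + k) h' (by omega) hpred
        · exact h'
        · -- i+1+k < lo : lo still fits, contradicting maximality of k
          exfalso
          have hklt : k < r.length := by omega
          have hmax := pvTakeCnt_max r (PySem.Chars.len t) (hk ▸ hklt)
          rw [← hk] at hmax
          have hpred : pvS (ts.take lo) - pvS (ts.take i) ≤ 3002 := c3 (by omega)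
          have hmono : pvS (ts.take (i + 1 + (k + 1))) ≤ pvS (ts.take lo) :=
            pvS_take_mono ts (by omega)
          have hstep := htake (k + 1) (by omega)
          omega
      -- the slice is the greedy group
      have hslice : PySem.List.slice ts (some (i : Int)) (some (lo : Int))
          = t :: r.take k := by
        rw [PySem.List.slice_natCast, hdrop, hlok]
        rw [show i + 1 + k - i = k + 1 by omega, List.take_succ_cons]
      rw [hslice]
      have hdrop2 : ts.drop lo = r.drop k := by
        rw [hlok, hr, List.drop_drop]
      rw [ih lo (chunks ++ [PySem.Chars.join ['\n', '\n'] (t :: r.take k)]) (by omega), hdrop2]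
      conv_rhs => rw [hdrop, pvGreedy_cons, ← hk]
      simp only [List.map_cons, List.append_assoc, List.singleton_append, pvJ]
    · rw [pvOuterB, if_neg hlt]
      rw [List.drop_eq_nil_of_le (by omega)]
      simp [pvGreedy_nil]

-- ===== VERDICT (by name: the statement is the Claim_ definition above) =====
theorem chunk_pdf_pages_spec : Claim_equal_chunk_pdf_pages := by
  intro pages _
  show chunk_pdf_pages pages = chunk_pdf_pages_alt pages
  rw [pvStageA, pvGroups_eq_greedy]
  show _ = (pvOuterB (pvTexts pages) ((pvTexts pages).foldl pvStepP [0])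
      (pvTexts pages).length (pvTexts pages).length 0 []).map String.ofList
  rw [pvOuter_eq (pvTexts pages) (pvTexts pages).length 0 [] (by omega)]
  simp [List.map_map, Function.comp]
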